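-- pv_equiv track=rewrite | github.com/IdoKendo/advent_of_code_2022 | advent_of_code_2022/day_15_solution.py | get_boundary
-- ===== SOURCE A (Python) =====
-- def get_boundary(x: int, y: int, radius: int) -> tuple[int, int]:
--     boundary = (x, y + radius)
--     while boundary != (x + radius, y):
--         boundary = (boundary[0] + 1, boundary[1] - 1)
--         yield boundary
--     while boundary != (x, y - radius):
--         boundary = (boundary[0] - 1, boundary[1] - 1)
--         yield boundary
--     while boundary != (x - radius, y):
--         boundary = (boundary[0] - 1, boundary[1] + 1)
--         yield boundary
--     while boundary != (x, y + radius):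
--         boundary = (boundary[0] + 1, boundary[1] + 1)
--         yield boundary
-- ===== SOURCE B (Python) =====
-- def get_boundary(x: int, y: int, radius: int):
--     for i in range(radius):
--         yield (x + i + 1, y + radius - i - 1)
--     for i in range(radius):
--         yield (x + radius - i - 1, y - i - 1)
--     for i in range(radius):
--         yield (x - i - 1, y - radius + i + 1)
--     for i in range(radius):
--         yield (x - radius + i + 1, y + i + 1)
-- ===== Notes on version B (the rewrite author's own statement) =====
-- stated objective: idiomatic
-- what changed: B computes each boundary point in closed form from the side index with four bounded range loops, instead of A's incremental while-loops that step a running position until it hits the next corner.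
-- outside the precondition, e.g. on get_boundary(0, 0, -1): A does not finish within the time limit, B returns []
import Mathlib
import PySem

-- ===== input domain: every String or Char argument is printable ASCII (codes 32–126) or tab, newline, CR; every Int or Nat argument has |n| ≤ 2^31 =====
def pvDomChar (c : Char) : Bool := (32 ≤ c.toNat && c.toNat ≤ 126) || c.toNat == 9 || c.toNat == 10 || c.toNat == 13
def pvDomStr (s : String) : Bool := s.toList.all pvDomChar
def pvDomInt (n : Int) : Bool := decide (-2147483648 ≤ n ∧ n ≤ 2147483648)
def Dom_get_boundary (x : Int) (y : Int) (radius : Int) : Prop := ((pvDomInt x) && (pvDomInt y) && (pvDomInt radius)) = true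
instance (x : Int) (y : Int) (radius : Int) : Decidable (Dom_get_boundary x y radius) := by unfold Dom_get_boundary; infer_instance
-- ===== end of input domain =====

-- B replaces A's incremental while-loops (stepping a running position until the next corner)
-- by four bounded range loops computing each point in closed form from its index (idiomatic; same cost).


-- ===== PORT A =====
-- One while loop of A: step `boundary` by (dx,dy), yielding each new position, until it equals
-- `target`. The fuel bound only makes the recursion total; inside Pre_ (radius ≥ 0) each loop
-- reaches its corner in exactly radius steps, so fuel = radius.toNat is never the reason to stop.
def gbLoop (fuel : Nat) (b target : Int × Int) (dx dy : Int) : List (Int × Int) × (Int × Int) :=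
  match fuel with
  | 0 => ([], b)
  | n + 1 =>
    if b = target then ([], b)
    else
      let b' := (b.1 + dx, b.2 + dy)
      let r := gbLoop n b' target dx dy
      (b' :: r.1, r.2)

def get_boundary (x : Int) (y : Int) (radius : Int) : List (Int × Int) :=
  let f := radius.toNat
  let r1 := gbLoop f (x, y + radius) (x + radius, y) 1 (-1)
  let r2 := gbLoop f r1.2 (x, y - radius) (-1) (-1)
  let r3 := gbLoop f r2.2 (x - radius, y) (-1) 1
  let r4 := gbLoop f r3.2 (x, y + radius) 1 1
  r1.1 ++ r2.1 ++ r3.1 ++ r4.1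

-- ===== PORT B =====
def get_boundary_alt (x : Int) (y : Int) (radius : Int) : List (Int × Int) :=
  (PySem.List.pyRange 0 radius 1).map (fun i => (x + i + 1, y + radius - i - 1)) ++
  (PySem.List.pyRange 0 radius 1).map (fun i => (x + radius - i - 1, y - i - 1)) ++
  (PySem.List.pyRange 0 radius 1).map (fun i => (x - i - 1, y - radius + i + 1)) ++
  (PySem.List.pyRange 0 radius 1).map (fun i => (x - radius + i + 1, y + i + 1))

-- ===== PRECONDITION & SPEC =====
-- Pre_ excludes radius < 0, on which A's first while-loop never meets its corner and A diverges.
def Pre_get_boundary (x : Int) (y : Int) (radius : Int) : Prop := 0 ≤ radius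
instance (x : Int) (y : Int) (radius : Int) : Decidable (Pre_get_boundary x y radius) := by unfold Pre_get_boundary; infer_instance
def pvWitness_get_boundary : Int × Int × Int := (1, 2, 2)
def Spec_get_boundary (x : Int) (y : Int) (radius : Int) (out : List (Int × Int)) : Prop := out = get_boundary_alt x y radius
instance (x : Int) (y : Int) (radius : Int) (out : List (Int × Int)) : Decidable (Spec_get_boundary x y radius out) := by unfold Spec_get_boundary; infer_instance

-- ===== CLAIM (what is proved, stated in full; the proofs are below) =====
def Claim_equal_get_boundary : Prop := ∀ (x : Int) (y : Int) (radius : Int), Dom_get_boundary x y radius → Pre_get_boundary x y radius → Spec_get_boundary x y radius (get_boundary x y radius)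

-- ===== LEMMAS AND PROOFS =====

theorem gbLoop_eq (dx dy : Int) (hdx : dx = 1 ∨ dx = -1) :
    ∀ (n : Nat) (b1 b2 : Int),
    gbLoop n (b1, b2) (b1 + dx * n, b2 + dy * n) dx dy
      = ((List.range n).map (fun (k : Nat) => (b1 + dx * ((k : Int) + 1), b2 + dy * ((k : Int) + 1))), (b1 + dx * n, b2 + dy * n)) := by
  intro n
  induction n with
  | zero => intro b1 b2; simp [gbLoop]
  | succ n ih =>
    intro b1 b2
    have hne : ((b1, b2) : Int × Int) ≠ (b1 + dx * (n + 1 : Nat), b2 + dy * (n + 1 : Nat)) := by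
      intro h
      have h1 := congrArg Prod.fst h
      simp only at h1
      rcases hdx with hd | hd <;> (subst hd; push_cast at h1; omega)
    have ht1 : b1 + dx * ((n : Int) + 1) = (b1 + dx) + dx * n := by ring
    have ht2 : b2 + dy * ((n : Int) + 1) = (b2 + dy) + dy * n := by ring
    have hc : ((n + 1 : Nat) : Int) = (n : Int) + 1 := by push_cast; ring
    simp only [gbLoop, if_neg hne]
    rw [hc, ht1, ht2, ih (b1 + dx) (b2 + dy), List.range_succ_eq_map]
    simp only [List.map_cons, List.map_map, List.cons.injEq, Prod.mk.injEq, Nat.cast_zero]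
    refine ⟨⟨⟨by ring, by ring⟩, ?_⟩, trivial⟩
    apply List.map_congr_left
    intro k _
    simp only [Function.comp_apply, Prod.mk.injEq]
    push_cast
    constructor <;> ring

theorem get_boundary_eq_alt (x y radius : Int) (h : 0 ≤ radius) :
    get_boundary x y radius = get_boundary_alt x y radius := by
  have hn : ((radius.toNat : Nat) : Int) = radius := Int.toNat_of_nonneg h
  have e1 : ((x + radius, y) : Int × Int)
      = (x + 1 * (radius.toNat : Int), (y + radius) + (-1) * (radius.toNat : Int)) := by
    rw [Prod.mk.injEq]; constructor <;> (rw [hn]; ring)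
  have e2 : ((x, y - radius) : Int × Int)
      = ((x + 1 * (radius.toNat : Int)) + (-1) * (radius.toNat : Int),
         ((y + radius) + (-1) * (radius.toNat : Int)) + (-1) * (radius.toNat : Int)) := by
    rw [Prod.mk.injEq]; constructor <;> (rw [hn]; ring)
  have e3 : ((x - radius, y) : Int × Int)
      = (((x + 1 * (radius.toNat : Int)) + (-1) * (radius.toNat : Int)) + (-1) * (radius.toNat : Int),
         (((y + radius) + (-1) * (radius.toNat : Int)) + (-1) * (radius.toNat : Int)) + 1 * (radius.toNat : Int)) := by
    rw [Prod.mk.injEq]; constructor <;> (rw [hn]; ring)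
  have e4 : ((x, y + radius) : Int × Int)
      = ((((x + 1 * (radius.toNat : Int)) + (-1) * (radius.toNat : Int)) + (-1) * (radius.toNat : Int)) + 1 * (radius.toNat : Int),
         ((((y + radius) + (-1) * (radius.toNat : Int)) + (-1) * (radius.toNat : Int)) + 1 * (radius.toNat : Int)) + 1 * (radius.toNat : Int)) := by
    rw [Prod.mk.injEq]; constructor <;> (rw [hn]; ring)
  unfold get_boundary get_boundary_alt
  dsimp only
  rw [e1, gbLoop_eq 1 (-1) (Or.inl rfl)]
  dsimp only
  rw [e2, gbLoop_eq (-1) (-1) (Or.inr rfl)]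
  dsimp only
  rw [e3, gbLoop_eq (-1) 1 (Or.inr rfl)]
  dsimp only
  rw [e4, gbLoop_eq 1 1 (Or.inl rfl)]
  dsimp only
  rw [PySem.List.pyRange_one]
  simp only [List.map_map, Int.sub_zero]
  rw [hn]
  congr 1
  · congr 1
    · congr 1
      · apply List.map_congr_left; intro k _
        simp only [Function.comp_apply, Prod.mk.injEq]; constructor <;> push_cast <;> ring
      · apply List.map_congr_left; intro k _
        simp only [Function.comp_apply, Prod.mk.injEq]; constructor <;> push_cast <;> ring
    · apply List.map_congr_left; intro k _
      simp only [Function.comp_apply, Prod.mk.injEq]; constructor <;> push_cast <;> ring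
  · apply List.map_congr_left; intro k _
    simp only [Function.comp_apply, Prod.mk.injEq]; constructor <;> push_cast <;> ring

-- ===== VERDICT (by name: the statement is the Claim_ definition above) =====
theorem get_boundary_spec : Claim_equal_get_boundary := by
  intro x y radius _ hpre
  unfold Spec_get_boundary
  exact get_boundary_eq_alt x y radius hpre
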